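-- pv_equiv track=rewrite | github.com/savex/salt-cfg-checker | cfg_checker/modules/packages/versions.py | split_revision
-- ===== SOURCE A (Python) =====
-- def split_revision(version_fragment):
--     # The symbols are -, +, ~
--     _symbols = ['-', '+', '~']
--     # nums, coz it is faster then regex
--     _chars = [46, 48, 49, 50, 51, 52, 53, 54, 55, 56, 57]
--     _ord_map = [ord(ch) not in _chars for ch in version_fragment]
--     # if there is nothing to extract, return at once
--     if not any([_s in version_fragment for _s in _symbols]) \
--         and not any(_ord_map):
--         # no revisions
--         return version_fragment, ""
--     else:
--         _main = _rev = ""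
--         # get indices
--         _indices = []
--         for _s in _symbols:
--             if _s in version_fragment:
--                 _indices.append(version_fragment.index(_s))
--         for _s in version_fragment:
--             if ord(_s) not in _chars:
--                 _indices.append(version_fragment.index(_s))
--         # sort indices
--         _indices.sort()
--         # extract starting from the lowest one
--         _main = version_fragment[:_indices[0]]
--         _rev = version_fragment[_indices[0]:]
--         return _main, _rev
-- ===== SOURCE B (Python) =====
-- def split_revision(version_fragment):
--     for i, c in enumerate(version_fragment):
--         if c not in ".0123456789":
--             return version_fragment[:i], version_fragment[i:]
--     return version_fragment, ""
-- ===== Notes on version B (the rewrite author's own statement) =====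
-- stated objective: faster
-- what changed: Replaced A's symbol-membership pre-check plus collect-all-first-occurrence-indices-then-sort-then-take-minimum strategy with a single left-to-right scan that splits at the first character outside dot/digits.
import Mathlib
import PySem

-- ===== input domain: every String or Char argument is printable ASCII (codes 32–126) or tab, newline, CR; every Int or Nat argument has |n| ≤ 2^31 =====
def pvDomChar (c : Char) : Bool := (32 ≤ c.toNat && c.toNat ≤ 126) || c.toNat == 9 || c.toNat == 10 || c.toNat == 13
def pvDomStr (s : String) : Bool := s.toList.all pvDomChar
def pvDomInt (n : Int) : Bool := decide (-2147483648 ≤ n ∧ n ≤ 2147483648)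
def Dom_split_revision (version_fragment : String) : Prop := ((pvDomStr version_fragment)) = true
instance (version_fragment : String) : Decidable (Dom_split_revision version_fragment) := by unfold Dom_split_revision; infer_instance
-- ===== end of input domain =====

-- B replaces A's collect-all-indices/sort/take-minimum strategy (each collected index re-scans the string) with one left-to-right scan that stops at the first non-dot/digit character (objective: faster; measured).

-- ===== PORT A =====
-- Python A's `_chars` (codes of '.' and '0'-'9') and `_symbols`
def pvCharsA : List Nat := [46, 48, 49, 50, 51, 52, 53, 54, 55, 56, 57]
def pvSymbolsA : List Char := ['-', '+', '~']

-- Notes on exactness: `version_fragment[:i]` / `[i:]` with the nonnegative Nat index i are exactly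
-- take/drop on the character list; `version_fragment.index(c)` (only called when c is present, so it
-- cannot raise) is List.idxOf (first occurrence); `_indices.sort()` on a list of ints is the stable
-- mergeSort by ≤; `_indices[0]` is headI — in the else branch `_indices` is provably nonempty, so
-- Python's IndexError is unreachable there.
def split_revision (version_fragment : String) : String × String :=
  let l := version_fragment.toList
  let ordMap : List Bool := l.map (fun ch => !(pvCharsA.contains ch.toNat))
  if !(pvSymbolsA.any (fun s => l.contains s)) && !(ordMap.any id) then
    (version_fragment, "")
  else
    let indices₁ : List Nat :=
      pvSymbolsA.foldl (fun acc s => if l.contains s then acc ++ [l.idxOf s] else acc) []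
    let indices : List Nat :=
      l.foldl (fun acc c => if !(pvCharsA.contains c.toNat) then acc ++ [l.idxOf c] else acc) indices₁
    let sorted := indices.mergeSort (fun a b => a ≤ b)
    (String.ofList (l.take sorted.headI), String.ofList (l.drop sorted.headI))

-- ===== PORT B =====
-- B's string literal ".0123456789" as a character list
def pvNormalB : List Char := ['.', '0', '1', '2', '3', '4', '5', '6', '7', '8', '9']

-- the enumerate loop of Source B: index i runs alongside the remaining characters
def pvScanB (s : String) : List Char → Nat → String × String
  | [], _ => (s, "")
  | c :: rest, i =>
    if !(pvNormalB.contains c) then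
      (String.ofList (s.toList.take i), String.ofList (s.toList.drop i))
    else pvScanB s rest (i + 1)

def split_revision_alt (version_fragment : String) : String × String :=
  pvScanB version_fragment version_fragment.toList 0

-- ===== PRECONDITION & SPEC =====
def Spec_split_revision (version_fragment : String) (out : String × String) : Prop := out = split_revision_alt version_fragment
instance (version_fragment : String) (out : String × String) : Decidable (Spec_split_revision version_fragment out) := by unfold Spec_split_revision; infer_instance

-- ===== CLAIM (what is proved, stated in full; the proofs are below) =====
def Claim_equal_split_revision : Prop := ∀ (version_fragment : String), Dom_split_revision version_fragment → Spec_split_revision version_fragment (split_revision version_fragment)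

-- ===== LEMMAS AND PROOFS =====

-- "bad" = the character at which both programs split: not '.' and not a digit
def pvBad (c : Char) : Bool := !(pvCharsA.contains c.toNat)

theorem pvChar_eq_of_toNat (c d : Char) (h : c.toNat = d.toNat) : c = d := by
  rcases c with ⟨⟨⟨⟨v, hv⟩⟩⟩, h1⟩
  rcases d with ⟨⟨⟨⟨w, hw⟩⟩⟩, h2⟩
  simp [Char.toNat, UInt32.toNat, BitVec.toNat] at h
  subst h
  rfl

theorem pvBeq_toNat (c d : Char) : (c == d) = (c.toNat == d.toNat) := by
  by_cases h : c = d
  · subst h; simp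
  · have hn : c.toNat ≠ d.toNat := fun hnn => h (pvChar_eq_of_toNat c d hnn)
    simp [h, hn]

theorem pvContains_map_toNat (l : List Char) (c : Char) :
    (l.map Char.toNat).contains c.toNat = l.contains c := by
  induction l with
  | nil => rfl
  | cons d rest ih =>
    simp only [List.map_cons, List.contains_cons, ih, pvBeq_toNat]

-- B's membership test agrees with A's ord-code test
theorem pvBad_bridge (c : Char) : (!(pvNormalB.contains c)) = pvBad c := by
  unfold pvBad
  rw [← pvContains_map_toNat pvNormalB c]
  rw [show pvNormalB.map Char.toNat = pvCharsA from by decide]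

theorem pvFindIdx_le (l : List Char) (p : Char → Bool) (i : Nat) (h : i < l.length)
    (hp : p l[i]) : l.findIdx p ≤ i := by
  by_contra hc
  have hlt : i < l.findIdx p := Nat.lt_of_not_le hc
  exact absurd hp (by simpa using List.not_of_lt_findIdx hlt)

theorem pvIdxOf_le (l : List Char) (c : Char) (i : Nat) (h : i < l.length)
    (he : l[i] = c) : l.idxOf c ≤ i := by
  have : l.findIdx (· == c) ≤ i := pvFindIdx_le l (· == c) i h (by simp [he])
  simpa [List.idxOf] using this

-- every index A collects is ≥ the first bad position, because it is the first occurrence of a bad char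
theorem pvIdxOf_bad_ge (l : List Char) (c : Char) (hc : c ∈ l) (hbad : pvBad c = true) :
    l.findIdx pvBad ≤ l.idxOf c := by
  have hlt : l.idxOf c < l.length := List.idxOf_lt_length_of_mem hc
  exact pvFindIdx_le l pvBad _ hlt (by rw [List.getElem_idxOf hlt]; exact hbad)

-- the first bad position itself is collected: it is the first occurrence of the char standing there
theorem pvFindIdx_eq_idxOf (l : List Char) (h : l.findIdx pvBad < l.length) :
    l.idxOf l[l.findIdx pvBad] = l.findIdx pvBad := by
  have hbad : pvBad l[l.findIdx pvBad] = true := List.findIdx_getElem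
  have h1 : l.idxOf l[l.findIdx pvBad] ≤ l.findIdx pvBad := pvIdxOf_le l _ _ h rfl
  have h2 : l.findIdx pvBad ≤ l.idxOf l[l.findIdx pvBad] :=
    pvIdxOf_bad_ge l _ (List.getElem_mem h) hbad
  omega

-- B's scan when no bad character remains
theorem pvScanB_no_bad (s : String) (l : List Char) (i : Nat)
    (h : ∀ c ∈ l, pvBad c = false) : pvScanB s l i = (s, "") := by
  induction l generalizing i with
  | nil => rfl
  | cons c rest ih =>
    have hc : pvBad c = false := h c (by simp)
    rw [pvScanB, pvBad_bridge, hc]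
    simpa using ih (i + 1) (fun d hd => h d (by simp [hd]))

-- B's scan when a bad character remains: split at i + first bad position of the suffix
theorem pvScanB_bad (s : String) (l : List Char) (i : Nat)
    (h : l.findIdx pvBad < l.length) :
    pvScanB s l i = (String.ofList (s.toList.take (i + l.findIdx pvBad)),
                     String.ofList (s.toList.drop (i + l.findIdx pvBad))) := by
  induction l generalizing i with
  | nil => simp at h
  | cons c rest ih =>
    rw [pvScanB, pvBad_bridge]
    cases hc : pvBad c with
    | true => simp [List.findIdx_cons, hc]
    | false =>
      have hfind : (c :: rest).findIdx pvBad = rest.findIdx pvBad + 1 := by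
        simp [List.findIdx_cons, hc]
      have hres : rest.findIdx pvBad < rest.length := by
        rw [hfind] at h; simpa using h
      simp only [Bool.false_eq_true, if_false]
      rw [ih (i + 1) hres, hfind]
      have harith : i + 1 + rest.findIdx pvBad = i + (rest.findIdx pvBad + 1) := by omega
      rw [harith]

theorem pvFindIdx_lt_of_any (l : List Char) (h : l.any pvBad = true) :
    l.findIdx pvBad < l.length := by
  rcases List.any_eq_true.mp h with ⟨c, hc, hb⟩
  rcases List.getElem_of_mem hc with ⟨i, hi, rfl⟩
  exact lt_of_le_of_lt (pvFindIdx_le l pvBad i hi hb) hi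

-- ===== VERDICT (by name: the statement is the Claim_ definition above) =====
theorem split_revision_spec : Claim_equal_split_revision := by
  intro s _
  simp only [Spec_split_revision, split_revision, split_revision_alt]
  by_cases hany : s.toList.any pvBad = true
  · -- some bad character exists: A takes the else branch
    have hfi : s.toList.findIdx pvBad < s.toList.length := pvFindIdx_lt_of_any s.toList hany
    have hord : (s.toList.map (fun ch => !(pvCharsA.contains ch.toNat))).any id = true := by
      simpa [List.any_map, Function.comp, pvBad] using hany
    rw [hord]
    simp only [Bool.not_true, Bool.and_false, Bool.false_eq_true, if_false]
    rw [PySem.List.foldl_append_if (fun c => s.toList.contains c) (fun c => s.toList.idxOf c) pvSymbolsA []]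
    rw [show (fun (acc : List Nat) (c : Char) => if !(pvCharsA.contains c.toNat) then acc ++ [s.toList.idxOf c] else acc)
          = (fun acc c => if pvBad c then acc ++ [s.toList.idxOf c] else acc) from rfl]
    rw [PySem.List.foldl_append_if pvBad (fun c => s.toList.idxOf c) s.toList _]
    set indices : List Nat :=
      ([] ++ (pvSymbolsA.filter (fun c => s.toList.contains c)).map (fun c => s.toList.idxOf c)) ++
        ((s.toList.filter pvBad).map fun c => s.toList.idxOf c) with hind
    set j := s.toList.findIdx pvBad with hj
    have hmem_ge : ∀ k ∈ indices, j ≤ k := by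
      intro k hk
      rcases List.mem_append.mp hk with hk | hk
      · simp only [List.nil_append, List.mem_map, List.mem_filter] at hk
        rcases hk with ⟨c, ⟨hcsym, hcl⟩, rfl⟩
        have hbad : pvBad c = true := by
          simp only [pvSymbolsA, List.mem_cons, List.not_mem_nil, or_false] at hcsym
          rcases hcsym with rfl | rfl | rfl <;> decide
        exact pvIdxOf_bad_ge s.toList c (by simpa using hcl) hbad
      · simp only [List.mem_map, List.mem_filter] at hk
        rcases hk with ⟨c, ⟨hcl, hbad⟩, rfl⟩
        exact pvIdxOf_bad_ge s.toList c hcl hbad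
    have hj_mem : j ∈ indices := by
      have hc0 : s.toList[j] ∈ s.toList.filter pvBad :=
        List.mem_filter.mpr ⟨List.getElem_mem hfi, List.findIdx_getElem⟩
      have hmm : s.toList.idxOf s.toList[j] ∈ (s.toList.filter pvBad).map fun c => s.toList.idxOf c :=
        List.mem_map.mpr ⟨s.toList[j], hc0, rfl⟩
      rw [pvFindIdx_eq_idxOf s.toList hfi] at hmm
      exact List.mem_append.mpr (Or.inr hmm)
    have hperm := indices.mergeSort_perm (fun a b => a ≤ b)
    have hpair : (indices.mergeSort (fun a b => a ≤ b)).Pairwise (fun a b => decide (a ≤ b) = true) :=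
      List.sorted_mergeSort
        (by intro a b c h1 h2; simp only [decide_eq_true_eq] at h1 h2 ⊢; omega)
        (by intro a b; simpa using Nat.le_total a b) indices
    have hhead : (indices.mergeSort (fun a b => a ≤ b)).headI = j := by
      rcases hs : indices.mergeSort (fun a b => a ≤ b) with _ | ⟨h₀, t⟩
      · exact absurd (hperm.mem_iff.mpr hj_mem) (by simp [hs])
      · have hh0 : h₀ ∈ indices := hperm.mem_iff.mp (by simp [hs])
        have h1 : j ≤ h₀ := hmem_ge h₀ hh0
        have h2 : h₀ ≤ j := by
          rcases (by simpa [hs] using hperm.mem_iff.mpr hj_mem : j = h₀ ∨ j ∈ t) with h | h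
          · omega
          · have hp := hpair
            rw [hs] at hp
            simpa using (List.pairwise_cons.mp hp).1 j h
        simp only [List.headI]
        omega
    rw [hhead, pvScanB_bad s s.toList 0 hfi]
    simp [← hj]
  · -- no bad character: both return (s, "")
    have hall : ∀ c ∈ s.toList, pvBad c = false := by
      intro c hc
      by_contra hcc
      exact hany (List.any_eq_true.mpr ⟨c, hc, by simpa using hcc⟩)
    have hord : (s.toList.map (fun ch => !(pvCharsA.contains ch.toNat))).any id = false := by
      have hf : s.toList.any pvBad = false := by simpa using hany
      simpa [List.any_map, Function.comp, pvBad] using hf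
    have hsym : pvSymbolsA.any (fun c => s.toList.contains c) = false := by
      apply List.any_eq_false.mpr
      intro sym hsymm
      by_contra hcc
      have hmem : sym ∈ s.toList := by simpa using hcc
      have hbad : pvBad sym = true := by
        simp only [pvSymbolsA, List.mem_cons, List.not_mem_nil, or_false] at hsymm
        rcases hsymm with rfl | rfl | rfl <;> decide
      exact absurd (hall sym hmem) (by simp [hbad])
    rw [hord, hsym]
    simp [pvScanB_no_bad s s.toList 0 hall]
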